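-- pv_equiv track=rewrite | github.com/Towich/PythonPractice | main.py | prog34
-- ===== SOURCE A (Python) =====
-- def prog34(b, n, a):
--     s1 = 0
--     s2 = 0
--     s3 = 1
--     for j in range(n):
--         for c in range(b):
--             s1 += ((34*j + 41)**4 - 93*(c + 79 + c**3)**5)
--
--
--     for c in range(b):
--         for k in range(a):
--             s2 += 22 * (c - 8)** 5 - k ** 4
--         s3 *= s2
--     return s3
-- ===== SOURCE B (Python) =====
-- def prog34(b, n, a):
--     # product of running sums; inner k-loop replaced by the Faulhaber closed form, dead s1 loop dropped
--     m = a if a > 0 else 0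
--     s4 = (m - 1) * m * (2 * m - 1) * (3 * m * m - 3 * m - 1) // 30  # sum of k**4 for k in range(m)
--     s2 = 0
--     s3 = 1
--     for c in range(b):
--         s2 += 22 * m * (c - 8) ** 5 - s4
--         s3 *= s2
--     return s3
-- ===== Notes on version B (the rewrite author's own statement) =====
-- stated objective: alternative
-- what changed: Dropped the dead s1 double loop over n*b and replaced the inner k-loop by the Faulhaber closed form for the sum of k**4, so each running-sum step is a single arithmetic expression.
import Mathlib
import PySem

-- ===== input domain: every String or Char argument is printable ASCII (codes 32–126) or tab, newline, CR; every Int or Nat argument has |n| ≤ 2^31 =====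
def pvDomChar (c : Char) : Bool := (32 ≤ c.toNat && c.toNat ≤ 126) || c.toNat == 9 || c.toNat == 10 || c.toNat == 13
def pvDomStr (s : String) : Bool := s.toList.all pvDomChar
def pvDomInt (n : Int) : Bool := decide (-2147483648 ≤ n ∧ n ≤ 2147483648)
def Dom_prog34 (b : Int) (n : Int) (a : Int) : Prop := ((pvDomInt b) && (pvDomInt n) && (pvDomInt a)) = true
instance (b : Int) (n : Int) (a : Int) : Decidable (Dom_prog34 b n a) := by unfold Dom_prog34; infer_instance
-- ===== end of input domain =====

-- B drops the unused s1 loop and replaces the inner k-loop by the Faulhaber closed form for the sum of k**4 (a different algorithm; timing not claimed).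

-- ===== PORT A =====
def prog34 (b : Int) (n : Int) (a : Int) : Int :=
  let _s1 : Int := (PySem.List.pyRange 0 n 1).foldl (fun s1 j =>
      (PySem.List.pyRange 0 b 1).foldl (fun s1 c =>
        s1 + ((34*j + 41)^4 - 93*(c + 79 + c^3)^5)) s1) 0
  let p : Int × Int := (PySem.List.pyRange 0 b 1).foldl (fun (p : Int × Int) c =>
      let s2 := (PySem.List.pyRange 0 a 1).foldl (fun s2 k =>
        s2 + (22*(c - 8)^5 - k^4)) p.1
      (s2, p.2 * s2)) (0, 1)
  p.2

-- ===== PORT B =====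
def prog34_alt (b : Int) (n : Int) (a : Int) : Int :=
  let m : Int := if a > 0 then a else 0
  let s4 : Int := PySem.Int.floordiv ((m - 1) * m * (2*m - 1) * (3*m*m - 3*m - 1)) 30
  let p : Int × Int := (PySem.List.pyRange 0 b 1).foldl (fun (p : Int × Int) c =>
      let s2 := p.1 + (22*m*(c - 8)^5 - s4)
      (s2, p.2 * s2)) (0, 1)
  p.2

-- ===== PRECONDITION & SPEC =====
def Spec_prog34 (b : Int) (n : Int) (a : Int) (out : Int) : Prop := out = prog34_alt b n a
instance (b : Int) (n : Int) (a : Int) (out : Int) : Decidable (Spec_prog34 b n a out) := by unfold Spec_prog34; infer_instance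

-- ===== CLAIM (what is proved, stated in full; the proofs are below) =====
def Claim_equal_prog34 : Prop := ∀ (b : Int) (n : Int) (a : Int), Dom_prog34 b n a → Spec_prog34 b n a (prog34 b n a)

-- ===== LEMMAS AND PROOFS =====

/-- sum of k^4 for k < m (proof-side helper) -/
def pvS4 (m : Nat) : Int := ((List.range m).map (fun k => ((k : Int))^4)).sum

theorem pvS4_succ (m : Nat) : pvS4 (m+1) = pvS4 m + ((m:Int))^4 := by
  simp [pvS4, List.range_succ]

theorem pvS4_closed (m : Nat) :
    pvS4 m * 30 = ((m:Int) - 1) * m * (2*m - 1) * (3*(m:Int)*m - 3*m - 1) := by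
  induction m with
  | zero => simp [pvS4]
  | succ m ih =>
    rw [pvS4_succ]
    push_cast
    push_cast at ih
    nlinarith [ih]

theorem pvInner (C : Int) (m : Nat) : ∀ s : Int,
    (PySem.List.pyRange 0 (m:Int) 1).foldl (fun s k => s + (C - k^4)) s
      = s + ((m:Int) * C - pvS4 m) := by
  induction m with
  | zero => intro s; simp [PySem.List.pyRange_one_eq_nil, pvS4]
  | succ m ih =>
    intro s
    rw [show ((m+1 : Nat):Int) = (m:Int) + 1 by push_cast; ring,
        PySem.List.pyRange_one_succ_right (by positivity), List.foldl_append]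
    simp only [List.foldl, ih, pvS4_succ]
    ring

theorem pvInnerInt (C a : Int) (s : Int) :
    (PySem.List.pyRange 0 a 1).foldl (fun s k => s + (C - k^4)) s
      = s + ((a.toNat : Int) * C - pvS4 a.toNat) := by
  by_cases h : a ≤ 0
  · rw [PySem.List.pyRange_one_eq_nil h]
    have h0 : a.toNat = 0 := by omega
    simp [h0, pvS4]
  · have hcast : ((a.toNat : Int)) = a := by omega
    rw [← hcast]
    exact pvInner C a.toNat s

theorem pvS4_div (m : Nat) :
    PySem.Int.floordiv (((m:Int) - 1) * m * (2*m - 1) * (3*(m:Int)*m - 3*m - 1)) 30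
      = pvS4 m := by
  rw [← pvS4_closed, PySem.Int.floordiv_eq_ediv_of_pos (by norm_num)]
  exact Int.mul_ediv_cancel _ (by norm_num)

theorem prog34_spec : Claim_equal_prog34 := by
  intro b n a _
  unfold Spec_prog34 prog34 prog34_alt
  have hm : (if a > 0 then a else 0) = ((a.toNat : Int)) := by
    split_ifs with h <;> omega
  have hstep : ∀ (p : Int × Int) (c : Int),
      ((PySem.List.pyRange 0 a 1).foldl (fun s2 k => s2 + (22*(c - 8)^5 - k^4)) p.1,
        p.2 * (PySem.List.pyRange 0 a 1).foldl (fun s2 k => s2 + (22*(c - 8)^5 - k^4)) p.1)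
    = (p.1 + (22*((a.toNat : Int))*(c - 8)^5 - pvS4 a.toNat),
        p.2 * (p.1 + (22*((a.toNat : Int))*(c - 8)^5 - pvS4 a.toNat))) := by
    intro p c
    rw [pvInnerInt]
    have : ((a.toNat : Int)) * (22*(c - 8)^5) = 22*((a.toNat : Int))*(c - 8)^5 := by ring
    rw [this]
  simp only [hm, pvS4_div, hstep]
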